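-- pv_equiv track=rewrite | github.com/jsheng0722/Cpts_315 | HW3/Fortune.py | get_words_except_stopW
-- ===== SOURCE A (Python) =====
-- def get_words_except_stopW(file1,file2):
--     aList = []
--     for datas in file1:
--         data = datas.split()
--         for words in data:
--             if words not in aList:
--                 aList.append(words)
--     for words in file2:
--         if words in aList:
--             aList.remove(words)
--     return (sorted(aList))
-- ===== SOURCE B (Python) =====
-- def get_words_except_stopW(file1, file2):
--     # Flatten all lines into one token list, sort it, then one linear pass:
--     # keep a token when it differs from the previous one (dedup of a sorted
--     # list) and is not a stopword.
--     tokens = []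
--     for line in file1:
--         tokens.extend(line.split())
--     tokens.sort()
--     stop = set(file2)
--     result = []
--     prev = None
--     for w in tokens:
--         if w != prev and w not in stop:
--             result.append(w)
--         prev = w
--     return result
-- ===== Notes on version B (the rewrite author's own statement) =====
-- stated objective: faster
-- what changed: Replaces A's quadratic membership-scan dedup list and per-stopword list.remove passes by flatten-all-tokens, one sort, a set of stopwords and a single linear adjacent-dedup/filter pass over the sorted tokens.
import Mathlib
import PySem

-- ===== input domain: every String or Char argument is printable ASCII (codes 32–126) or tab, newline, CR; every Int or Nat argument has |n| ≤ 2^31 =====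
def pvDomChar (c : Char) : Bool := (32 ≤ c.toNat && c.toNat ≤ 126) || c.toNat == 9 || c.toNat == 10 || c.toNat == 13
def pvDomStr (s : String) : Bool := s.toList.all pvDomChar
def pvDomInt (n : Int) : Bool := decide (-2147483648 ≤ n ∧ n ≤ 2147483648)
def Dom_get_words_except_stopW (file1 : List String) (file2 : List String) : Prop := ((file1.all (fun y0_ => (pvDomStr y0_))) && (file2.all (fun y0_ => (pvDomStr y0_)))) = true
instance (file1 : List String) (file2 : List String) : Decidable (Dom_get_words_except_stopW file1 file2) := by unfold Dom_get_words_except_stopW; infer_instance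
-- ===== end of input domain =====

-- B replaces A's quadratic membership-scan dedup and per-stopword list.remove passes
-- by flatten + one sort + a stopword set + a single linear adjacent-dedup/filter pass (faster).

-- ===== PORT A =====
def get_words_except_stopW (file1 : List String) (file2 : List String) : List String :=
  let aList := file1.foldl (fun acc datas =>
    (PySem.Str.split₀ datas).foldl (fun acc words => if List.contains acc words then acc else acc ++ [words]) acc) []
  let aList2 := file2.foldl (fun acc words => if List.contains acc words then acc.erase words else acc) aList
  PySem.List.sorted aList2 (fun x => x) false

-- ===== PORT B =====
def get_words_except_stopW_alt (file1 : List String) (file2 : List String) : List String :=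
  let tokens := file1.foldl (fun acc line => acc ++ PySem.Str.split₀ line) []
  let sortedTokens := PySem.List.sorted tokens (fun x => x) false
  let stop : PySem.Set String := PySem.Set.ofList file2
  (sortedTokens.foldl (fun (st : List String × Option String) w =>
      (if some w ≠ st.2 ∧ PySem.Set.contains stop w = false then st.1 ++ [w] else st.1, some w))
    ([], none)).1

-- ===== PRECONDITION & SPEC =====
def Spec_get_words_except_stopW (file1 : List String) (file2 : List String) (out : List String) : Prop := out = get_words_except_stopW_alt file1 file2
instance (file1 : List String) (file2 : List String) (out : List String) : Decidable (Spec_get_words_except_stopW file1 file2 out) := by unfold Spec_get_words_except_stopW; infer_instance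

-- ===== CLAIM (what is proved, stated in full; the proofs are below) =====
def Claim_equal_get_words_except_stopW : Prop := ∀ (file1 : List String) (file2 : List String), Dom_get_words_except_stopW file1 file2 → Spec_get_words_except_stopW file1 file2 (get_words_except_stopW file1 file2)

-- ===== LEMMAS AND PROOFS =====

-- A's dedup loop builds exactly set(tokens) in first-insertion order.
theorem dedupLoop_eq_ofList (file1 : List String) : ∀ (s : List String),
    file1.foldl (fun acc datas =>
      (PySem.Str.split₀ datas).foldl (fun acc words => if List.contains acc words then acc else acc ++ [words]) acc)
      (PySem.Set.ofList s)
    = PySem.Set.ofList (file1.foldl (fun acc line => acc ++ PySem.Str.split₀ line) s) := by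
  induction file1 with
  | nil => intro s; rfl
  | cons l rest ih =>
    intro s
    simp only [List.foldl_cons]
    have hstep : (PySem.Str.split₀ l).foldl
        (fun acc words => if List.contains acc words then acc else acc ++ [words]) (PySem.Set.ofList s)
        = PySem.Set.ofList (s ++ PySem.Str.split₀ l) := by
      rw [PySem.Set.ofList_append]
      rfl
    rw [hstep, ih]

-- A's removal loop on a duplicate-free list filters out exactly the stopwords.
theorem removeLoop_eq_filter : ∀ (l : List String) (acc : List String), acc.Nodup →
    l.foldl (fun acc words => if List.contains acc words then acc.erase words else acc) acc
    = acc.filter (fun x => !l.contains x) := by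
  intro l
  induction l with
  | nil => intro acc _; simp
  | cons w t ih =>
    intro acc hnd
    simp only [List.foldl_cons]
    have hstep : (if List.contains acc w then acc.erase w else acc) = acc.filter (fun x => x != w) := by
      by_cases hw : w ∈ acc
      · rw [if_pos (by simpa using hw), List.Nodup.erase_eq_filter hnd]
      · rw [if_neg (by simpa using hw), Eq.comm, List.filter_eq_self]
        intro a ha
        simp only [bne_iff_ne, ne_eq]
        intro h; exact hw (h ▸ ha)
    rw [hstep, ih _ (hnd.filter _), List.filter_filter]
    apply List.filter_congr
    intro x _
    simp only [List.contains_cons, Bool.not_or, Bool.and_comm, bne]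

-- The recursive shape of B's linear pass.
def scanAux (stop : List String) : Option String → List String → List String
  | _, [] => []
  | prev, w :: rest =>
      (if some w ≠ prev ∧ PySem.Set.contains stop w = false then [w] else []) ++ scanAux stop (some w) rest

theorem foldl_eq_scanAux (stop : List String) : ∀ (L res : List String) (prev : Option String),
    (L.foldl (fun (st : List String × Option String) w =>
        (if some w ≠ st.2 ∧ PySem.Set.contains stop w = false then st.1 ++ [w] else st.1, some w))
      (res, prev)).1 = res ++ scanAux stop prev L := by
  intro L
  induction L with
  | nil => intro res prev; simp [scanAux]
  | cons w rest ih =>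
    intro res prev
    simp only [List.foldl_cons, scanAux]
    by_cases h : some w ≠ prev ∧ PySem.Set.contains stop w = false
    · rw [if_pos h, if_pos h, ih]; simp
    · rw [if_neg h, if_neg h, ih]; simp

-- On a ≤-sorted list, B's pass keeps exactly the non-stopwords, one copy each, in strictly increasing order.
theorem scanAux_spec (stop : List String) : ∀ (L : List String) (prev : Option String),
    L.Pairwise (· ≤ ·) → (∀ v, prev = some v → ∀ y ∈ L, v ≤ y) →
    (∀ x, x ∈ scanAux stop prev L ↔ (x ∈ L ∧ x ∉ stop ∧ some x ≠ prev)) ∧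
    (scanAux stop prev L).Pairwise (· < ·) := by
  intro L
  induction L with
  | nil => intro prev _ _; simp [scanAux]
  | cons w rest ih =>
    intro prev hpw hprev
    have hwle : ∀ y ∈ rest, w ≤ y := fun y hy => (List.pairwise_cons.1 hpw).1 y hy
    obtain ⟨hmem, hpair⟩ := ih (some w) (List.pairwise_cons.1 hpw).2
      (fun v hv y hy => by cases hv; exact hwle y hy)
    have hcontains : PySem.Set.contains stop w = false ↔ w ∉ stop := by
      simp [PySem.Set.contains_eq_listContains]
    -- an element of rest other than w can never coincide with prev
    have hne : ∀ x, x ∈ rest → x ≠ w → some x ≠ prev := by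
      intro x hx hxw hxp
      have h1 : x ≤ w := hprev x hxp.symm w List.mem_cons_self
      exact hxw (le_antisymm h1 (hwle x hx))
    constructor
    · intro x
      simp only [scanAux, List.mem_append, hmem, List.mem_cons]
      by_cases hc : some w ≠ prev ∧ PySem.Set.contains stop w = false
      · rw [if_pos hc]
        constructor
        · rintro (hxw | ⟨hx, hxs, hxw⟩)
          · have hx : x = w := by simpa using hxw
            subst hx
            exact ⟨Or.inl rfl, hcontains.1 hc.2, hc.1⟩
          · have hxw' : x ≠ w := by simpa using hxw
            exact ⟨Or.inr hx, hxs, hne x hx hxw'⟩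
        · rintro ⟨hx, hxs, hxp⟩
          by_cases hxe : x = w
          · subst hxe; exact Or.inl (by simp)
          · rcases hx with hx | hx
            · exact absurd hx hxe
            · exact Or.inr ⟨hx, hxs, by simpa using hxe⟩
      · rw [if_neg hc]
        simp only [List.not_mem_nil, false_or]
        have hc' : prev = some w ∨ PySem.Set.contains stop w = true := by
          rcases not_and_or.1 hc with h | h
          · exact Or.inl (not_not.1 h).symm
          · exact Or.inr (by simpa using h)
        constructor
        · rintro ⟨hx, hxs, hxw⟩
          have hxw' : x ≠ w := by simpa using hxw
          exact ⟨Or.inr hx, hxs, hne x hx hxw'⟩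
        · rintro ⟨hx, hxs, hxp⟩
          have hxe : x ≠ w := by
            intro he; subst he
            rcases hc' with h | h
            · exact hxp h.symm
            · have hf := hcontains.2 hxs
              rw [h] at hf; simp at hf
          rcases hx with hx | hx
          · exact absurd hx hxe
          · exact ⟨hx, hxs, by simpa using hxe⟩
    · simp only [scanAux]
      by_cases hc : some w ≠ prev ∧ PySem.Set.contains stop w = false
      · rw [if_pos hc]
        simp only [List.singleton_append, List.pairwise_cons]
        refine ⟨?_, hpair⟩
        intro y hy
        obtain ⟨hyr, _, hyw⟩ := (hmem y).1 hy
        have : y ≠ w := by simpa using hyw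
        exact lt_of_le_of_ne (hwle y hyr) (Ne.symm this)
      · rw [if_neg hc]; simpa using hpair

-- ===== VERDICT (by name: the statement is the Claim_ definition above) =====
theorem get_words_except_stopW_spec : Claim_equal_get_words_except_stopW := by
  intro file1 file2 _
  unfold Spec_get_words_except_stopW
  have hA : get_words_except_stopW file1 file2
      = PySem.List.sorted (file2.foldl (fun acc words => if List.contains acc words then acc.erase words else acc)
          (file1.foldl (fun acc datas => (PySem.Str.split₀ datas).foldl
            (fun acc words => if List.contains acc words then acc else acc ++ [words]) acc) [])) (fun x => x) false := rfl
  have hB : get_words_except_stopW_alt file1 file2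
      = ((PySem.List.sorted (file1.foldl (fun acc line => acc ++ PySem.Str.split₀ line) []) (fun x => x) false).foldl
          (fun (st : List String × Option String) w =>
            (if some w ≠ st.2 ∧ PySem.Set.contains (PySem.Set.ofList file2) w = false then st.1 ++ [w] else st.1, some w))
          ([], none)).1 := rfl
  rw [hA, hB]
  have hded := dedupLoop_eq_ofList file1 []
  rw [show PySem.Set.ofList ([] : List String) = [] from rfl] at hded
  rw [hded]
  set tokens := file1.foldl (fun acc line => acc ++ PySem.Str.split₀ line) [] with htok
  rw [removeLoop_eq_filter file2 (PySem.Set.ofList tokens) (PySem.Set.nodup_ofList tokens)]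
  rw [foldl_eq_scanAux (PySem.Set.ofList file2) _ [] none, List.nil_append]
  have hpw : (PySem.List.sorted tokens (fun x => x) false).Pairwise (· ≤ ·) := by
    have := PySem.List.sorted_pairwise (xs := tokens) (key := fun x => x)
    simpa using this
  obtain ⟨hmem, hpair⟩ := scanAux_spec (PySem.Set.ofList file2)
    (PySem.List.sorted tokens (fun x => x) false) none hpw (by intro v hv; cases hv)
  apply PySem.List.sorted_eq_of_perm_of_pairwise_lt
  · apply (List.perm_ext_iff_of_nodup ?_ ?_).2
    · intro a
      rw [hmem a, List.mem_filter]
      simp [PySem.List.mem_sorted, PySem.Set.mem_ofList]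
    · exact hpair.imp ne_of_lt
    · exact (PySem.Set.nodup_ofList tokens).filter _
  · exact hpair
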